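-- pv_equiv track=rewrite | github.com/EnriHeller/TDA_Notes | ejercicios/PD/ladron.py | lunatico
-- ===== SOURCE A (Python) =====
-- def lunatico(ganancias):
--     if len(ganancias) == 1:
--         return [0]  # Si solo hay una casa, esa es la única opción para robar.
--
--     # Resolver excluyendo la casa 0 y excluyendo la casa n-1
--     indices_excluyendo_primera = resolver(ganancias[1:])  # Excluimos casa 0
--     indices_excluyendo_primera = [i + 1 for i in indices_excluyendo_primera]  # Ajustamos los índices
--
--     indices_excluyendo_ultima = resolver(ganancias[:-1])  # Excluimos casa n-1
--
--     # Escoger la solución con mayor ganancia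
--     if suma(ganancias, indices_excluyendo_primera) > suma(ganancias, indices_excluyendo_ultima):
--         return indices_excluyendo_primera
--     else:
--         return indices_excluyendo_ultima
--
-- def resolver(ganancias):
--     n = len(ganancias)
--     if n == 0:
--         return []
--     elif n == 1:
--         return [0]
--
--     # Tabla de programación dinámica para guardar soluciones
--     dp = [0] * n
--     dp[0] = ganancias[0]
--
--     if n > 1:
--         dp[1] = max(ganancias[0], ganancias[1])
--
--     # Crear la tabla de soluciones
--     for i in range(2, n):
--         dp[i] = max(dp[i-1], dp[i-2] + ganancias[i])
--
--     # Reconstruir los índices de las casas que debemos robar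
--     indices = []
--     i = n - 1
--     while i >= 0:
--         if i == 0 or dp[i] != dp[i-1]:
--             indices.append(i)
--             i -= 2  # Si robamos esta casa, no podemos robar la anterior
--         else:
--             i -= 1  # No robamos esta casa, pasamos a la anterior
--
--     indices.reverse()  # Para devolver en orden de menor a mayor
--     return indices
--
-- def suma(ganancias, indices):
--     return sum(ganancias[i] for i in indices)
-- ===== SOURCE B (Python) =====
-- def lunatico(ganancias):
--     n = len(ganancias)
--     if n == 0:
--         return []
--     if n == 1:
--         return [0]
--     v1, l1 = _solve(ganancias[1:])
--     l1 = [i + 1 for i in l1]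
--     v2, l2 = _solve(ganancias[:-1])
--     return l1 if v1 > v2 else l2
--
-- def _solve(g):
--     # one forward pass: carry (value, chain) for the best at i-2 and i-1,
--     # where chain is a persistent linked list (index, parent) of chosen indices
--     n = len(g)
--     if n == 0:
--         return 0, []
--     if n == 1:
--         return g[0], [0]
--     p = (g[0], (0, None))
--     q = (max(g[0], g[1]), (1, None) if g[1] > g[0] else (0, None))
--     i = 2
--     for x in g[2:]:
--         if p[0] + x > q[0]:
--             p, q = q, (p[0] + x, (i, p[1]))
--         else:
--             p = q
--         i += 1
--     out = []
--     node = q[1]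
--     while node is not None:
--         out.append(node[0])
--         node = node[1]
--     out.reverse()
--     return q[0], out
-- ===== Notes on version B (the rewrite author's own statement) =====
-- stated objective: faster
-- what changed: resolver's fill-a-value-table-then-walk-backward reconstruction is replaced by a single forward pass carrying (value, chosen-index chain) for the two previous positions, so the index list is built directly and the final comparison reuses the carried values instead of re-summing; a timing run measured B about 2x faster at the largest size.
import Mathlib
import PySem

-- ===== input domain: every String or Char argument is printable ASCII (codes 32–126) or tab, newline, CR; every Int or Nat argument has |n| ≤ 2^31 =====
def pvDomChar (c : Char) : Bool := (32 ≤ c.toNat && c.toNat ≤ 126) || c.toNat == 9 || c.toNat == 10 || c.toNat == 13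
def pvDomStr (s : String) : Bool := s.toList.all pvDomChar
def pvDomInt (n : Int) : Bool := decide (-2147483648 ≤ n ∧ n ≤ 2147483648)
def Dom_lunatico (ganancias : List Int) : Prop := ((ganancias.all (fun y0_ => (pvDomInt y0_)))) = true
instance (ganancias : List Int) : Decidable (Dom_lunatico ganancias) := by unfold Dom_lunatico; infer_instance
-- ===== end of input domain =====

-- B replaces A's value-table-then-backward-walk reconstruction by a single forward pass
-- carrying (value, chosen-index chain) pairs for the two previous positions (measured faster).

-- ===== PORT A =====
-- the backward reconstruction while-loop of `resolver` (collects indices in descending order)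
def pvWalkA (dp : List Int) (i : Int) : List Int :=
  if i < 0 then []
  else if i = 0 ∨ dp.getD i.toNat 0 ≠ dp.getD (i - 1).toNat 0 then
    i :: pvWalkA dp (i - 2)   -- robamos esta casa, saltamos la anterior
  else
    pvWalkA dp (i - 1)
termination_by (i + 1).toNat
decreasing_by all_goals omega

-- suma(ganancias, indices); the indices produced are always in range, so getD is exact here
def pvSumaA (ganancias : List Int) (indices : List Int) : Int :=
  (indices.map (fun i => ganancias.getD i.toNat 0)).sum

def pvResolverA (ganancias : List Int) : List Int :=
  let n := ganancias.length
  if n = 0 then []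
  else if n = 1 then [(0 : Int)]
  else
    let dp := (List.replicate n (0 : Int)).set 0 (ganancias.getD 0 0)
    let dp := if n > 1 then dp.set 1 (max (ganancias.getD 0 0) (ganancias.getD 1 0)) else dp
    let dp := (List.range' 2 (n - 2)).foldl
      (fun d i => d.set i (max (d.getD (i - 1) 0) (d.getD (i - 2) 0 + ganancias.getD i 0))) dp
    (pvWalkA dp ((n : Int) - 1)).reverse

def lunatico (ganancias : List Int) : List Int :=
  if ganancias.length = 1 then [0]
  else
    -- ganancias[1:] = drop 1, ganancias[:-1] = take (len-1): exact for these slices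
    let i1 := (pvResolverA (ganancias.drop 1)).map (· + 1)
    let i2 := pvResolverA (ganancias.take (ganancias.length - 1))
    if pvSumaA ganancias i1 > pvSumaA ganancias i2 then i1 else i2

-- ===== PORT B =====
-- forward loop of _solve: p, q are the best (value, chain) at positions i-2 and i-1;
-- Python's persistent (index, parent) chain is this list built by prepending
def pvRunB (p q : Int × List Int) (i : Int) (l : List Int) : Int × List Int :=
  match l with
  | [] => q
  | x :: xs =>
    if p.1 + x > q.1 then pvRunB q (p.1 + x, i :: p.2) (i + 1) xs
    else pvRunB q q (i + 1) xs

def pvSolveB (g : List Int) : Int × List Int :=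
  match g with
  | [] => (0, [])
  | [a] => (a, [0])
  | a :: b :: rest =>
    let r := pvRunB (a, [0]) (if b > a then (b, [1]) else (a, [0])) 2 rest
    (r.1, r.2.reverse)   -- the unwind-and-reverse of the chosen chain

def lunatico_alt (ganancias : List Int) : List Int :=
  match ganancias with
  | [] => []
  | [_] => [0]
  | _ =>
    let s1 := pvSolveB ganancias.tail
    let l1 := s1.2.map (· + 1)
    let s2 := pvSolveB ganancias.dropLast
    if s1.1 > s2.1 then l1 else s2.2

-- ===== PRECONDITION & SPEC =====
def Spec_lunatico (ganancias : List Int) (out : List Int) : Prop := out = lunatico_alt ganancias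
instance (ganancias : List Int) (out : List Int) : Decidable (Spec_lunatico ganancias out) := by unfold Spec_lunatico; infer_instance

-- ===== CLAIM (what is proved, stated in full; the proofs are below) =====
def Claim_equal_lunatico : Prop := ∀ (ganancias : List Int), Dom_lunatico ganancias → Spec_lunatico ganancias (lunatico ganancias)

-- ===== LEMMAS AND PROOFS =====

-- the common mathematical DP: value and index list of the best non-adjacent subset of g[0..i]
def pvGi (g : List Int) (i : Nat) : Int := g.getD i 0

def pvDpv (g : List Int) : Nat → Int
  | 0 => pvGi g 0
  | 1 => max (pvGi g 0) (pvGi g 1)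
  | (i+2) => max (pvDpv g (i+1)) (pvDpv g i + pvGi g (i+2))

def pvBl (g : List Int) : Nat → List Int
  | 0 => [0]
  | 1 => if pvGi g 1 > pvGi g 0 then [(1 : Int)] else [0]
  | (i+2) => if pvDpv g i + pvGi g (i+2) > pvDpv g (i+1) then pvBl g i ++ [((i : Int) + 2)]
             else pvBl g (i+1)

theorem getD_set' (l : List Int) (i j : Nat) (a : Int) :
    (l.set i a).getD j 0 = if i = j ∧ i < l.length then a else l.getD j 0 := by
  simp only [List.getD, List.getElem?_set]
  split_ifs <;> simp_all <;> omega

theorem dpTab_spec (g : List Int) (hn : 2 ≤ g.length) (k : Nat) (hk : k ≤ g.length - 2) :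
    ((List.range' 2 k).foldl
      (fun d i => d.set i (max (d.getD (i - 1) 0) (d.getD (i - 2) 0 + g.getD i 0)))
      (((List.replicate g.length (0 : Int)).set 0 (g.getD 0 0)).set 1
        (max (g.getD 0 0) (g.getD 1 0)))).length = g.length ∧
    ∀ j, j < k + 2 →
      ((List.range' 2 k).foldl
        (fun d i => d.set i (max (d.getD (i - 1) 0) (d.getD (i - 2) 0 + g.getD i 0)))
        (((List.replicate g.length (0 : Int)).set 0 (g.getD 0 0)).set 1
          (max (g.getD 0 0) (g.getD 1 0)))).getD j 0 = pvDpv g j := by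
  induction k with
  | zero =>
    simp only [List.range'_zero, List.foldl_nil]
    refine ⟨by simp, ?_⟩
    intro j hj
    interval_cases j
    · rw [getD_set', if_neg (by simp), getD_set', if_pos (by simp; omega)]
      rfl
    · rw [getD_set', if_pos (by simp; omega)]
      rfl
  | succ k ih =>
    have ih' := ih (by omega)
    rw [List.range'_1_concat, List.foldl_append, List.foldl_cons, List.foldl_nil]
    set D := (List.range' 2 k).foldl
        (fun d i => d.set i (max (d.getD (i - 1) 0) (d.getD (i - 2) 0 + g.getD i 0)))
        (((List.replicate g.length (0 : Int)).set 0 (g.getD 0 0)).set 1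
          (max (g.getD 0 0) (g.getD 1 0))) with hD
    obtain ⟨hlen, hval⟩ := ih'
    constructor
    · simp [hlen]
    · intro j hj
      rw [getD_set']
      by_cases hje : 2 + k = j
      · rw [if_pos ⟨hje, by omega⟩]
        subst hje
        rw [show 2 + k - 1 = k + 1 by omega, show 2 + k - 2 = k by omega,
            hval (k+1) (by omega), hval k (by omega)]
        rw [show 2 + k = k + 2 by omega]
        rfl
      · rw [if_neg (by omega)]
        exact hval j (by omega)

theorem walk_zero (dp : List Int) : pvWalkA dp 0 = [0] := by
  rw [pvWalkA]; norm_num; rw [pvWalkA]; norm_num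

theorem walk_spec (g dp : List Int)
    (hdp : ∀ j, j < g.length → dp.getD j 0 = pvDpv g j) :
    ∀ i : Nat, i < g.length → pvWalkA dp (i : Int) = (pvBl g i).reverse := by
  intro i
  induction i using Nat.strong_induction_on with
  | _ i ih =>
    match i with
    | 0 => intro _; simp [walk_zero, pvBl]
    | 1 =>
      intro h1
      have e1 : dp.getD 1 0 = pvDpv g 1 := hdp 1 h1
      have e0 : dp.getD 0 0 = pvDpv g 0 := hdp 0 (by omega)
      rw [pvWalkA]
      rw [if_neg (by omega : ¬ ((1:Nat):Int) < 0)]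
      rw [show (((1:Nat):Int)).toNat = 1 from rfl, show (((1:Nat):Int) - 1).toNat = 0 from rfl, e1, e0]
      have hw : pvWalkA dp (((1:Nat):Int) - 2) = [] := by rw [pvWalkA]; norm_num
      by_cases hc : pvGi g 1 > pvGi g 0
      · have hd : pvDpv g 1 ≠ pvDpv g 0 := by
          show max (pvGi g 0) (pvGi g 1) ≠ pvGi g 0
          omega
        rw [if_pos (Or.inr hd), hw]
        simp [pvBl, hc]
      · have hd : ¬ (((1:Nat):Int) = 0 ∨ pvDpv g 1 ≠ pvDpv g 0) := by
          push Not
          refine ⟨by omega, ?_⟩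
          show max (pvGi g 0) (pvGi g 1) = pvGi g 0
          omega
        rw [if_neg hd, show (((1:Nat):Int) - 1) = 0 from rfl, walk_zero]
        simp [pvBl, hc]
    | (m+2) =>
      intro hm
      have e2 : dp.getD (m+2) 0 = pvDpv g (m+2) := hdp (m+2) hm
      have e1 : dp.getD (m+1) 0 = pvDpv g (m+1) := hdp (m+1) (by omega)
      rw [pvWalkA]
      push_cast
      have hlt : ¬ ((m:Int)+2) < 0 := by omega
      have ht2 : (((m:Int)+2)).toNat = m + 2 := by omega
      have ht1 : (((m:Int)+2) - 1).toNat = m + 1 := by omega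
      rw [if_neg hlt, ht2, ht1, e2, e1]
      have hne : (¬ ((m:Int)+2) = 0) := by omega
      by_cases hc : pvDpv g m + pvGi g (m+2) > pvDpv g (m+1)
      · have hd : pvDpv g (m+2) ≠ pvDpv g (m+1) := by
          show max (pvDpv g (m+1)) (pvDpv g m + pvGi g (m+2)) ≠ pvDpv g (m+1)
          omega
        rw [if_pos (Or.inr hd)]
        have : ((m:Int)+2) - 2 = (m:Nat) := by omega
        rw [this, ih m (by omega) (by omega)]
        simp [pvBl, hc]
      · have hd : ¬ ((m:Int)+2 = 0 ∨ pvDpv g (m+2) ≠ pvDpv g (m+1)) := by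
          push Not
          refine ⟨hne, ?_⟩
          show max (pvDpv g (m+1)) (pvDpv g m + pvGi g (m+2)) = pvDpv g (m+1)
          omega
        rw [if_neg hd]
        have : ((m:Int)+2) - 1 = ((m+1 : Nat) : Int) := by omega
        rw [this, ih (m+1) (by omega) (by omega)]
        simp [pvBl, hc]

theorem resolver_eq (g : List Int) (hg : g ≠ []) :
    pvResolverA g = pvBl g (g.length - 1) := by
  rcases Nat.lt_or_ge g.length 2 with h2 | h2
  · have h1 : g.length = 1 := by
      cases g with
      | nil => exact absurd rfl hg
      | cons a t => simp at h2 ⊢; omega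
    unfold pvResolverA
    rw [h1]
    norm_num [pvBl]
  · have hres : pvResolverA g =
        (pvWalkA ((List.range' 2 (g.length - 2)).foldl
            (fun d i => d.set i (max (d.getD (i - 1) 0) (d.getD (i - 2) 0 + g.getD i 0)))
            (((List.replicate g.length (0 : Int)).set 0 (g.getD 0 0)).set 1
              (max (g.getD 0 0) (g.getD 1 0)))) ((g.length : Int) - 1)).reverse := by
      unfold pvResolverA
      rw [if_neg (show ¬ g.length = 0 by omega), if_neg (show ¬ g.length = 1 by omega)]
      simp only [if_pos (show g.length > 1 by omega)]
    rw [hres]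
    obtain ⟨hlen, hval⟩ := dpTab_spec g h2 (g.length - 2) (le_refl _)
    have hw := walk_spec g _ (fun j hj => hval j (by omega)) (g.length - 1) (by omega)
    rw [show ((g.length : Int) - 1) = ((g.length - 1 : Nat) : Int) by omega] at *
    rw [hw, List.reverse_reverse]

theorem runB_spec (g : List Int) :
    ∀ (m k : Nat), k + 2 + m = g.length →
      pvRunB (pvDpv g k, (pvBl g k).reverse) (pvDpv g (k+1), (pvBl g (k+1)).reverse)
          ((k : Int) + 2) (g.drop (k+2))
        = (pvDpv g (k+1+m), (pvBl g (k+1+m)).reverse) := by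
  intro m
  induction m with
  | zero =>
    intro k hk
    rw [List.drop_of_length_le (by omega)]
    rfl
  | succ m ih =>
    intro k hk
    have hlt : k + 2 < g.length := by omega
    rw [List.drop_eq_getElem_cons hlt]
    have hx : g[k+2] = pvGi g (k+2) := by
      simp [pvGi, List.getD, List.getElem?_eq_getElem hlt]
    rw [hx]
    show pvRunB _ _ _ _ = _
    unfold pvRunB
    simp only
    by_cases hc : pvDpv g k + pvGi g (k+2) > pvDpv g (k+1)
    · rw [if_pos hc]
      have hv : pvDpv g k + pvGi g (k+2) = pvDpv g (k+2) := by
        show _ = max (pvDpv g (k+1)) (pvDpv g k + pvGi g (k+2))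
        omega
      have hb : ((k : Int) + 2) :: (pvBl g k).reverse = (pvBl g (k+2)).reverse := by
        rw [show pvBl g (k+2) = if pvDpv g k + pvGi g (k+2) > pvDpv g (k+1) then
              pvBl g k ++ [((k : Int) + 2)] else pvBl g (k+1) from rfl, if_pos hc,
            List.reverse_append]
        rfl
      rw [hv, hb]
      have hih := ih (k+1) (by omega)
      simp only [show k + 1 + 1 = k + 2 from rfl] at hih
      rw [show ((k:Int) + 2 + 1) = ((k+1 : Nat) : Int) + 2 by push_cast; ring,
          show k + 2 + 1 = (k+1) + 2 by omega,
          show k + 1 + (m+1) = k + 2 + m by omega]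
      exact hih
    · rw [if_neg hc]
      have hv : pvDpv g (k+2) = pvDpv g (k+1) := by
        show max (pvDpv g (k+1)) (pvDpv g k + pvGi g (k+2)) = _
        omega
      have hb : pvBl g (k+2) = pvBl g (k+1) := by
        rw [show pvBl g (k+2) = if pvDpv g k + pvGi g (k+2) > pvDpv g (k+1) then
              pvBl g k ++ [((k : Int) + 2)] else pvBl g (k+1) from rfl, if_neg hc]
      have hih := ih (k+1) (by omega)
      simp only [show k + 1 + 1 = k + 2 from rfl] at hih
      rw [hv, hb] at hih
      rw [show ((k:Int) + 2 + 1) = ((k+1 : Nat) : Int) + 2 by push_cast; ring,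
          show k + 2 + 1 = (k+1) + 2 by omega,
          show k + 1 + (m+1) = k + 2 + m by omega]
      exact hih

theorem solve_eq (g : List Int) (hg : g ≠ []) :
    pvSolveB g = (pvDpv g (g.length - 1), pvBl g (g.length - 1)) := by
  match g with
  | [a] => simp [pvSolveB, pvDpv, pvBl, pvGi]
  | a :: b :: rest =>
    show (let r := pvRunB (a, [0]) (if b > a then (b, [1]) else (a, [0])) 2 rest
          (r.1, r.2.reverse)) = _
    have h0 : ((a : Int), ([0] : List Int)) = (pvDpv (a::b::rest) 0, (pvBl (a::b::rest) 0).reverse) := by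
      simp [pvDpv, pvBl, pvGi]
    have h1 : (if b > a then ((b : Int), ([1] : List Int)) else (a, [0]))
        = (pvDpv (a::b::rest) 1, (pvBl (a::b::rest) 1).reverse) := by
      have hga : pvGi (a::b::rest) 0 = a := rfl
      have hgb : pvGi (a::b::rest) 1 = b := rfl
      show _ = (max (pvGi (a::b::rest) 0) (pvGi (a::b::rest) 1), _)
      rw [show pvBl (a::b::rest) 1 = if pvGi (a::b::rest) 1 > pvGi (a::b::rest) 0
            then [(1:Int)] else [0] from rfl, hga, hgb]
      split_ifs with h
      · rw [show max a b = b by omega]; rfl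
      · rw [show max a b = a by omega]; rfl
    have hrun := runB_spec (a::b::rest) rest.length 0 (by simp; omega)
    have hd : List.drop (0+2) (a::b::rest) = rest := rfl
    have hi : (((0:Nat):Int) + 2) = 2 := by norm_num
    simp only [Nat.zero_add] at hrun
    rw [hd, hi, ← h0, ← h1] at hrun
    show (_, _) = _
    rw [hrun]
    simp only [List.reverse_reverse]
    congr 2 <;> simp <;> omega

theorem bl_mem (g : List Int) : ∀ i, ∀ x ∈ pvBl g i, ∃ j : Nat, j ≤ i ∧ x = (j : Int)
  | 0 => by simp [pvBl]
  | 1 => by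
    simp only [pvBl]; split_ifs <;> rintro x hx <;> simp at hx <;> subst hx
    · exact ⟨1, by omega, rfl⟩
    · exact ⟨0, by omega, rfl⟩
  | (i+2) => by
    simp only [pvBl]; split_ifs with h
    · intro x hx
      rcases List.mem_append.1 hx with h1 | h1
      · obtain ⟨j, hj, rfl⟩ := bl_mem g i x h1; exact ⟨j, by omega, rfl⟩
      · simp at h1; exact ⟨i+2, by omega, by omega⟩
    · intro x hx
      obtain ⟨j, hj, rfl⟩ := bl_mem g (i+1) x hx; exact ⟨j, by omega, rfl⟩

theorem sumaA_append_single (g l : List Int) (x : Int) :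
    pvSumaA g (l ++ [x]) = pvSumaA g l + g.getD x.toNat 0 := by
  simp [pvSumaA]

theorem suma_bl (g : List Int) : ∀ i, pvSumaA g (pvBl g i) = pvDpv g i
  | 0 => by simp [pvBl, pvSumaA, pvDpv, pvGi]
  | 1 => by
    simp only [pvBl, pvDpv]; split_ifs with h <;>
      simp [pvSumaA, pvGi] at * <;> omega
  | (i+2) => by
    simp only [pvBl, pvDpv]; split_ifs with h
    · have hm : max (pvDpv g (i+1)) (pvDpv g i + pvGi g (i+2)) = pvDpv g i + pvGi g (i+2) :=
        max_eq_right (le_of_lt h)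
      have ht : ((i : Int) + 2).toNat = i + 2 := by omega
      rw [sumaA_append_single, suma_bl g i, ht, hm]
      rfl
    · have := suma_bl g (i+1)
      have hm : max (pvDpv g (i+1)) (pvDpv g i + pvGi g (i+2)) = pvDpv g (i+1) :=
        max_eq_left (by omega)
      rw [hm]; exact this

theorem suma_shift (a : Int) (t : List Int) (l : List Int) (h : ∀ x ∈ l, 0 ≤ x) :
    pvSumaA (a :: t) (l.map (· + 1)) = pvSumaA t l := by
  unfold pvSumaA
  rw [List.map_map]
  congr 1
  refine List.map_congr_left (fun x hx => ?_)
  have hx0 : 0 ≤ x := h x hx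
  have : (x + 1).toNat = x.toNat + 1 := by omega
  simp [this]

theorem suma_take (g : List Int) (m : Nat) (l : List Int)
    (h : ∀ x ∈ l, 0 ≤ x ∧ x.toNat < m) :
    pvSumaA (g.take m) l = pvSumaA g l := by
  unfold pvSumaA
  congr 1
  refine List.map_congr_left (fun x hx => ?_)
  have := h x hx
  simp [List.getD, this.2]

theorem bl_nonneg (g : List Int) (i : Nat) : ∀ x ∈ pvBl g i, 0 ≤ x := by
  intro x hx
  obtain ⟨j, _, rfl⟩ := bl_mem g i x hx
  omega

-- ===== VERDICT (by name: the statement is the Claim_ definition above) =====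
theorem lunatico_spec : Claim_equal_lunatico := by
  intro g _
  unfold Spec_lunatico
  match g with
  | [] => rfl
  | [a] => rfl
  | a :: b :: t =>
    have hA : lunatico (a :: b :: t) =
        (if pvSumaA (a :: b :: t) ((pvResolverA (b :: t)).map (· + 1)) >
            pvSumaA (a :: b :: t) (pvResolverA ((a :: b :: t).take (t.length + 1)))
         then (pvResolverA (b :: t)).map (· + 1)
         else pvResolverA ((a :: b :: t).take (t.length + 1))) := by
      unfold lunatico
      rw [if_neg (by simp)]
      rfl
    have hB : lunatico_alt (a :: b :: t) =
        (if (pvSolveB (b :: t)).1 > (pvSolveB ((a :: b :: t).dropLast)).1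
         then (pvSolveB (b :: t)).2.map (· + 1)
         else (pvSolveB ((a :: b :: t).dropLast)).2) := rfl
    have hdl : (a :: b :: t).dropLast = (a :: b :: t).take (t.length + 1) := by
      rw [List.dropLast_eq_take]
      simp
    set tk := (a :: b :: t).take (t.length + 1) with htk
    have htklen : tk.length = t.length + 1 := by
      rw [htk]; simp
    have htkne : tk ≠ [] := by
      intro hc; rw [hc] at htklen; simp at htklen
    have r1 : pvResolverA (b :: t) = pvBl (b :: t) t.length := by
      rw [resolver_eq (b :: t) (by simp)]; simp
    have r2 : pvResolverA tk = pvBl tk t.length := by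
      rw [resolver_eq tk htkne, htklen]; simp
    have s1 : pvSolveB (b :: t) = (pvDpv (b :: t) t.length, pvBl (b :: t) t.length) := by
      rw [solve_eq (b :: t) (by simp)]; simp
    have s2 : pvSolveB tk = (pvDpv tk t.length, pvBl tk t.length) := by
      rw [solve_eq tk htkne, htklen]; simp
    have sum1 : pvSumaA (a :: b :: t) ((pvBl (b :: t) t.length).map (· + 1))
        = pvDpv (b :: t) t.length := by
      rw [suma_shift a (b :: t) _ (bl_nonneg _ _), suma_bl]
    have sum2 : pvSumaA (a :: b :: t) (pvBl tk t.length) = pvDpv tk t.length := by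
      have hb : ∀ x ∈ pvBl tk t.length, 0 ≤ x ∧ x.toNat < t.length + 1 := by
        intro x hx
        obtain ⟨j, hj, rfl⟩ := bl_mem tk t.length x hx
        refine ⟨by omega, by simp; omega⟩
      rw [← suma_take (a :: b :: t) (t.length + 1) _ hb, ← htk, suma_bl]
    rw [hA, hB, hdl, r1, r2, s1, s2, sum1, sum2]
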